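-- pv_equiv track=rewrite | github.com/Vixiu/lolapi | GetSummonerMatch.py | count_consecutive_elements
-- ===== SOURCE A (Python) =====
-- def count_consecutive_elements(lst):
--     count_num = 1
--     first = lst[0]
--     if first == lst[1]:
--         for bl in lst[1:]:
--             if first == bl:
--                 count_num += 1
--             else:
--                 break
--         return f"{count_num}连{'胜' if first else '败'}" if count_num > 1 else ''
--     else:
--         first = not first
--         count_num = 0
--         for bl in lst[1:]:
--             if first == bl:
--                 count_num += 1
--             else:
--                 break
--         return f"{count_num}连{'胜' if first else '败'}中断" if count_num > 2 else ''
-- ===== SOURCE B (Python) =====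
-- def count_consecutive_elements(lst):
--     # Run-length encode the list once, then answer by indexing into the runs.
--     groups = []
--     for x in lst:
--         if groups and groups[-1][0] == x:
--             v, n = groups[-1]
--             groups[-1] = (v, n + 1)
--         else:
--             groups.append((x, 1))
--     v0, n0 = groups[0]
--     if n0 >= 2:
--         return f"{n0}连{'胜' if v0 else '败'}"
--     v1, n1 = groups[1]
--     return f"{n1}连{'胜' if v1 else '败'}中断" if n1 > 2 else ''
-- ===== Notes on version B (the rewrite author's own statement) =====
-- stated objective: alternative
-- what changed: B run-length-encodes the list once into (value,count) runs and decides from the first two runs, instead of A's two separate early-break counting loops behind a lst[0]==lst[1] branch.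
import Mathlib
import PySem

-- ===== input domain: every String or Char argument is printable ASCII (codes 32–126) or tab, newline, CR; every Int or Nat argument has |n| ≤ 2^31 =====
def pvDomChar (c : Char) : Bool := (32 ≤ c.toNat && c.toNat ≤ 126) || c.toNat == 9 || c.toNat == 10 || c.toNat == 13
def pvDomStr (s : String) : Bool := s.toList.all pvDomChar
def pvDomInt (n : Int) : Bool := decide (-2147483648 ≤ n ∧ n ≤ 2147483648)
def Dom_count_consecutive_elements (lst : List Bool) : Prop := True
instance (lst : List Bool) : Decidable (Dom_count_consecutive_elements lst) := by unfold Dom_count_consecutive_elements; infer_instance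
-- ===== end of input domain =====

-- B builds a run-length encoding once and reads the first two runs, instead of A's two
-- branch-selected early-break counting loops; equivalence is proved on lists of length ≥ 2
-- (A raises IndexError on shorter input, and so does B).

-- ===== PORT A =====
-- A's early-break counting loop: for bl in tail: if first == bl: count += 1 else: break
def countRunA (first : Bool) (tail : List Bool) (acc : Nat) : Nat :=
  match tail with
  | [] => acc
  | bl :: rest => if first == bl then countRunA first rest (acc + 1) else acc

def count_consecutive_elements (lst : List Bool) : String :=
  match lst with
  | [] => ""        -- Python raises IndexError (lst[0]); outside Pre_
  | [_] => ""       -- Python raises IndexError (lst[1]); outside Pre_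
  | first :: second :: rest =>
    if first == second then
      let c := countRunA first (second :: rest) 1   -- count_num = 1, loop over lst[1:]
      if c > 1 then toString c ++ "连" ++ (if first then "胜" else "败") else ""
    else
      let f := !first                               -- first = not first
      let c := countRunA f (second :: rest) 0       -- count_num = 0, loop over lst[1:]
      if c > 2 then toString c ++ "连" ++ (if f then "胜" else "败") ++ "中断" else ""

-- ===== PORT B =====
-- one step of Source B's run-length-encoding loop: merge into the last run or append a new one
def rleStep (groups : List (Bool × Nat)) (x : Bool) : List (Bool × Nat) :=
  match groups.getLast? with
  | some (v, n) => if v == x then groups.dropLast ++ [(v, n + 1)] else groups ++ [(x, 1)]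
  | none => groups ++ [(x, 1)]

def count_consecutive_elements_alt (lst : List Bool) : String :=
  let groups := lst.foldl rleStep []
  match groups with
  | [] => ""        -- Source B raises IndexError (groups[0]); outside Pre_
  | (v0, n0) :: gs =>
    if n0 ≥ 2 then toString n0 ++ "连" ++ (if v0 then "胜" else "败")
    else
      match gs with
      | [] => ""    -- Source B raises IndexError (groups[1]); outside Pre_
      | (v1, n1) :: _ => if n1 > 2 then toString n1 ++ "连" ++ (if v1 then "胜" else "败") ++ "中断" else ""

-- ===== PRECONDITION & SPEC =====
-- Pre_ excludes exactly the lists of length < 2, on which A raises IndexError.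
def Pre_count_consecutive_elements (lst : List Bool) : Prop := 2 ≤ lst.length
instance (lst : List Bool) : Decidable (Pre_count_consecutive_elements lst) := by unfold Pre_count_consecutive_elements; infer_instance
def pvWitness_count_consecutive_elements : List Bool := [true, true, false]

def Spec_count_consecutive_elements (lst : List Bool) (out : String) : Prop := out = count_consecutive_elements_alt lst
instance (lst : List Bool) (out : String) : Decidable (Spec_count_consecutive_elements lst out) := by unfold Spec_count_consecutive_elements; infer_instance

-- ===== CLAIM (what is proved, stated in full; the proofs are below) =====
def Claim_equal_count_consecutive_elements : Prop := ∀ (lst : List Bool), Dom_count_consecutive_elements lst → Pre_count_consecutive_elements lst → Spec_count_consecutive_elements lst (count_consecutive_elements lst)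

-- ===== LEMMAS AND PROOFS =====

-- proof-only recursive form of the RLE
def go (v : Bool) (n : Nat) : List Bool → List (Bool × Nat)
  | [] => [(v, n)]
  | x :: xs => if v == x then go v (n + 1) xs else (v, n) :: go x 1 xs

lemma foldl_rleStep_go (xs : List Bool) : ∀ (pre : List (Bool × Nat)) (v : Bool) (n : Nat),
    List.foldl rleStep (pre ++ [(v, n)]) xs = pre ++ go v n xs := by
  induction xs with
  | nil => intro pre v n; simp [go]
  | cons x xs ih =>
    intro pre v n
    simp only [List.foldl_cons, rleStep, List.getLast?_concat, go]
    by_cases h : v == x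
    · simpa [h, List.dropLast_concat] using ih pre v (n + 1)
    · simpa [h] using ih (pre ++ [(v, n)]) x 1

lemma go_head (xs : List Bool) : ∀ (v : Bool) (n : Nat),
    ∃ gs, go v n xs = (v, countRunA v xs n) :: gs := by
  induction xs with
  | nil => intro v n; exact ⟨[], rfl⟩
  | cons x xs ih =>
    intro v n
    by_cases h : v == x
    · obtain ⟨gs, hg⟩ := ih v (n + 1)
      exact ⟨gs, by simp [go, countRunA, h, hg]⟩
    · exact ⟨go x 1 xs, by simp [go, countRunA, h]⟩

lemma countRunA_ge (xs : List Bool) : ∀ (v : Bool) (n : Nat), n ≤ countRunA v xs n := by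
  induction xs with
  | nil => intro v n; simp [countRunA]
  | cons x xs ih =>
    intro v n
    by_cases h : v == x
    · simpa [countRunA, h] using le_trans (Nat.le_succ n) (ih v (n + 1))
    · simp [countRunA, h]

-- ===== VERDICT (by name: the statement is the Claim_ definition above) =====
theorem count_consecutive_elements_spec : Claim_equal_count_consecutive_elements := by
  intro lst _ hpre
  unfold Spec_count_consecutive_elements
  match lst with
  | [] => simp [Pre_count_consecutive_elements] at hpre
  | [_] => simp [Pre_count_consecutive_elements] at hpre
  | a :: b :: rest =>
    have hfold : List.foldl rleStep [] (a :: b :: rest) = go a 1 (b :: rest) := by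
      simpa using foldl_rleStep_go (b :: rest) [] a 1
    by_cases hab : a == b
    · -- first run has length ≥ 2; both sides format it
      obtain ⟨gs, hg⟩ := go_head (b :: rest) a 1
      have hge : 2 ≤ countRunA a (b :: rest) 1 := by
        simpa [countRunA, hab] using countRunA_ge rest a 2
      simp [count_consecutive_elements, count_consecutive_elements_alt, hfold, hg, hab,
        hge, Nat.lt_of_lt_of_le Nat.one_lt_two hge]
    · -- first run is the singleton a; second run starts at b = !a
      have hb : b = !a := by cases a <;> cases b <;> simp_all
      subst hb
      obtain ⟨gs, hg⟩ := go_head rest (!a) 1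
      have hfold2 : List.foldl rleStep [] (a :: (!a) :: rest)
          = (a, 1) :: (!a, countRunA (!a) rest 1) :: gs := by
        rw [hfold]; simp [go, hg]
      simp [count_consecutive_elements, count_consecutive_elements_alt, hfold2, countRunA]
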